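-- pv_equiv track=rewrite | github.com/pypi-data/pypi-mirror-396 | packages/pbir-utils/pbir_utils-1.6.0.tar.gz/pbir_utils-1.6.0/src/pbir_utils/pbir_measure_utils.py | _get_dependent_measures
-- ===== SOURCE A (Python) =====
-- def _get_dependent_measures(
--     measure_name: str,
--     measures_dict: dict,
--     visited: set = None,
--     include_all_dependents: bool = False,
-- ) -> set:
--     """
--     Recursively find measures that depend on the given measure.
--
--     Args:
--         measure_name (str): The name of the measure whose dependents are to be found.
--         measures_dict (dict): A dictionary of all measures with their names as keys and expressions as values.
--         visited (set, optional): A set to track visited measures during recursion to prevent infinite loops.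
--                                  Defaults to None.
--         include_all_dependents (bool, optional): Whether to include indirect dependents as well.
--                                                  Defaults to False.
--
--     Returns:
--         set: A set of dependent measures, either direct dependents or both direct and indirect dependents.
--     """
--     visited = visited or set()
--
--     if measure_name in visited:
--         return set()
--
--     visited.add(measure_name)
--
--     direct_dependents = {
--         other_measure
--         for other_measure, exp in measures_dict.items()
--         if f"[{measure_name}]" in exp
--     }
--
--     if not include_all_dependents:
--         return direct_dependents
--
--     return direct_dependents.union(
--         *(
--             _get_dependent_measures(dependent, measures_dict, visited, True)
--             for dependent in direct_dependents
--         )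
--     )
-- ===== SOURCE B (Python) =====
-- def _get_dependent_measures(
--     measure_name: str,
--     measures_dict: dict,
--     visited: set = None,
--     include_all_dependents: bool = False,
-- ) -> set:
--     """Iterative re-implementation: explicit-stack traversal instead of recursion.
--
--     Return value identical to the recursive original; unlike it, this does not
--     mutate the caller's `visited` set (return-value equivalence only)."""
--     seen = set(visited) if visited else set()
--     if measure_name in seen:
--         return set()
--     if not include_all_dependents:
--         return {m for m, exp in measures_dict.items() if f"[{measure_name}]" in exp}
--     result = set()
--     pending = [measure_name]
--     while pending:
--         cur = pending.pop()
--         if cur in seen: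
--             continue
--         seen.add(cur)
--         deps = [m for m, exp in measures_dict.items() if f"[{cur}]" in exp]
--         result.update(deps)
--         pending.extend(reversed(deps))
--     return result
-- ===== Notes on version B (the rewrite author's own statement) =====
-- stated objective: alternative
-- what changed: replaces the recursive set-union DFS (which threads a mutated visited set through nested recursive calls) with a single iterative while-loop over an explicit pending stack that accumulates the seen and result sets; B also does not mutate the caller's visited set.
import Mathlib
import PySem

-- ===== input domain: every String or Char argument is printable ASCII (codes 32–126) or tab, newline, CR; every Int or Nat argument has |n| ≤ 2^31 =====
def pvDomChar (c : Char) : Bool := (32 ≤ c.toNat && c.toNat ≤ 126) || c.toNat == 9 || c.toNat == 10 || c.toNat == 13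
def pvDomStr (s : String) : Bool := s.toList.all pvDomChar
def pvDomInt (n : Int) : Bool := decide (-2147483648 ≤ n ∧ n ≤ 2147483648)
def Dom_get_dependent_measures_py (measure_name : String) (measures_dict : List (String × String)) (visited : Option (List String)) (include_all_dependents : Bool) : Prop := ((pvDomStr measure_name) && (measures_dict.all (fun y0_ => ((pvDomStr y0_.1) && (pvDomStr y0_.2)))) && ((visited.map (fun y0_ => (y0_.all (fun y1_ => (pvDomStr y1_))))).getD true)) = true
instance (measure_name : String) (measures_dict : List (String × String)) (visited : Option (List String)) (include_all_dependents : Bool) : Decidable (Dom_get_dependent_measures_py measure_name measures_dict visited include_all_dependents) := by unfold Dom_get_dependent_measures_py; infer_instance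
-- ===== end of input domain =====

-- ===== PORT A =====
-- B changes the recursive set-union DFS of A into an iterative explicit-stack traversal (return-value
-- equivalence only: A mutates the caller's `visited` set in place, B does not).
-- Shared helper: BOTH Pythons contain the identical comprehension {m for m, exp in measures_dict.items() if f"[{name}]" in exp}.
def pvDirect (measures_dict : List (String × String)) (name : String) : List String :=
  PySem.Set.ofList ((measures_dict.filter
    (fun p => PySem.Str.isIn ("[" ++ name ++ "]") p.2)).map Prod.fst)

-- A's recursive body, fuel-bounded for totality only (fuel = |dict| + 2 never runs out: each nested
-- call adds a fresh name, names come from the dict keys plus the root).  Returns (result, visited);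
-- the Python generator argument of set.union is evaluated left to right mutating `visited`, which the
-- foldl threads through st.2 exactly.
def pvA (measures_dict : List (String × String)) (fuel : Nat) (name : String)
    (V : List String) (include_all : Bool) : List String × List String :=
  if V.contains name then ([], V)
  else
    match fuel with
    | 0 => ([], V)                                  -- unreachable totality guard
    | Nat.succ fuel' =>
      let V1 := PySem.Set.add V name
      let deps := pvDirect measures_dict name
      if !include_all then (deps, V1)
      else
        deps.foldl (fun st d =>
          let p := pvA measures_dict fuel' d st.2 true
          (PySem.Set.union st.1 p.1, p.2)) (deps, V1)
termination_by fuel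

def get_dependent_measures_py (measure_name : String) (measures_dict : List (String × String)) (visited : Option (List String)) (include_all_dependents : Bool) : List String :=
  -- `visited = visited or set()`: None and the empty set both become a fresh empty set, i.e. []
  (pvA measures_dict (measures_dict.length + 2) measure_name (visited.getD []) include_all_dependents).1

-- ===== PORT B =====
-- B's while-loop: `pending` is modelled head-as-top, so Python's pending.pop() / pending.extend(reversed(deps))
-- becomes pattern-matching the head / prepending deps.  fuel counts expansions only (≤ |dict| + 1, so
-- |dict| + 2 never runs out); it is a totality guard, not part of B's algorithm.
def pvMachine (measures_dict : List (String × String)) (fuel : Nat) (pending : List String)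
    (seen result : List String) : List String :=
  match pending with
  | [] => result
  | cur :: rest =>
    if seen.contains cur then pvMachine measures_dict fuel rest seen result
    else
      match fuel with
      | 0 => result                                 -- unreachable totality guard
      | Nat.succ fuel' =>
        let deps := pvDirect measures_dict cur
        pvMachine measures_dict fuel' (deps ++ rest) (PySem.Set.add seen cur)
          (PySem.Set.union result deps)
termination_by (fuel, pending.length)

def get_dependent_measures_py_alt (measure_name : String) (measures_dict : List (String × String)) (visited : Option (List String)) (include_all_dependents : Bool) : List String :=
  let seen := visited.getD []
  if seen.contains measure_name then []
  else if !include_all_dependents then pvDirect measures_dict measure_name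
  else pvMachine measures_dict (measures_dict.length + 2) [measure_name] seen []

-- ===== PRECONDITION & SPEC =====
def Spec_get_dependent_measures_py (measure_name : String) (measures_dict : List (String × String)) (visited : Option (List String)) (include_all_dependents : Bool) (out : List String) : Prop := out = get_dependent_measures_py_alt measure_name measures_dict visited include_all_dependents
instance (measure_name : String) (measures_dict : List (String × String)) (visited : Option (List String)) (include_all_dependents : Bool) (out : List String) : Decidable (Spec_get_dependent_measures_py measure_name measures_dict visited include_all_dependents out) := by unfold Spec_get_dependent_measures_py; infer_instance

-- ===== CLAIM (what is proved, stated in full; the proofs are below) =====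
def Claim_equal_get_dependent_measures_py : Prop := ∀ (measure_name : String) (measures_dict : List (String × String)) (visited : Option (List String)) (include_all_dependents : Bool), Dom_get_dependent_measures_py measure_name measures_dict visited include_all_dependents → Spec_get_dependent_measures_py measure_name measures_dict visited include_all_dependents (get_dependent_measures_py measure_name measures_dict visited include_all_dependents)

-- ===== LEMMAS AND PROOFS =====

-- number of names of U not yet visited: the termination / fuel-sufficiency measure
def pvFresh (U V : List String) : Nat := (U.filter (fun x => !(V.contains x))).length

theorem pvFresh_le_length (U V : List String) : pvFresh U V ≤ U.length := by
  exact List.length_filter_le _ _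

theorem contains_add (V : List String) (x y : String) :
    List.contains (PySem.Set.add V x) y = (List.contains V y || y == x) := by
  by_cases h : y ∈ PySem.Set.add V x
  · rcases (PySem.Set.mem_add _ _ _).1 h with h1 | h1
    · simp [h, h1]
    · simp [h, h1]
  · have h1 : y ∉ V := fun hv => h ((PySem.Set.mem_add _ _ _).2 (Or.inl hv))
    have h2 : y ≠ x := fun e => h ((PySem.Set.mem_add _ _ _).2 (Or.inr e))
    simp [h, h1, h2]

theorem pvFresh_antitone (U V W : List String)
    (h : ∀ y, V.contains y = true → W.contains y = true) : pvFresh U W ≤ pvFresh U V := by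
  induction U with
  | nil => simp [pvFresh]
  | cons a U ih =>
    simp only [pvFresh, List.filter_cons] at ih ⊢
    cases hW : W.contains a with
    | true =>
      cases hV : V.contains a with
      | true => simp only [hW, hV, Bool.not_true, Bool.not_false, Bool.false_or, Bool.or_true, Bool.or_false, Bool.true_or, Bool.false_eq_true, eq_self_iff_true, if_true, if_false, List.length_cons]; omega
      | false => simp only [hW, hV, Bool.not_true, Bool.not_false, Bool.false_or, Bool.or_true, Bool.or_false, Bool.true_or, Bool.false_eq_true, eq_self_iff_true, if_true, if_false, List.length_cons]; omega
    | false =>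
      have hV : V.contains a = false := by
        cases hVt : V.contains a with
        | false => rfl
        | true => exact absurd (h a hVt) (by rw [hW]; simp)
      simp only [hW, hV, Bool.not_true, Bool.not_false, Bool.false_or, Bool.or_true, Bool.or_false, Bool.true_or, Bool.false_eq_true, eq_self_iff_true, if_true, if_false, List.length_cons]; omega

theorem pvFresh_lt_of_add (U V : List String) (x : String) (hx : x ∈ U)
    (hV : V.contains x = false) : pvFresh U (PySem.Set.add V x) < pvFresh U V := by
  induction U with
  | nil => cases hx
  | cons a U ih =>
    simp only [pvFresh, List.filter_cons, contains_add] at ih ⊢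
    rcases List.mem_cons.1 hx with rfl | ha
    · have hle := pvFresh_antitone U V (PySem.Set.add V x) (fun y hy => by
        rw [contains_add, hy]; simp)
      simp only [pvFresh, contains_add] at hle
      simp only [hV, beq_self_eq_true, Bool.not_true, Bool.not_false, Bool.false_or, Bool.or_true, Bool.or_false, Bool.true_or, Bool.false_eq_true, eq_self_iff_true, if_true, if_false, List.length_cons]
      omega
    · have h1 := ih ha
      cases hVa : V.contains a with
      | true => simp only [hVa, Bool.not_true, Bool.not_false, Bool.false_or, Bool.or_true, Bool.or_false, Bool.true_or, Bool.false_eq_true, eq_self_iff_true, if_true, if_false, List.length_cons]; omega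
      | false =>
        cases hxa : a == x with
        | true => simp only [hVa, hxa, Bool.not_true, Bool.not_false, Bool.false_or, Bool.or_true, Bool.or_false, Bool.true_or, Bool.false_eq_true, eq_self_iff_true, if_true, if_false, List.length_cons]; omega
        | false => simp only [hVa, hxa, Bool.not_true, Bool.not_false, Bool.false_or, Bool.or_true, Bool.or_false, Bool.true_or, Bool.false_eq_true, eq_self_iff_true, if_true, if_false, List.length_cons]; omega

theorem pvDirect_subset (measures_dict : List (String × String)) (name y : String)
    (h : y ∈ pvDirect measures_dict name) : y ∈ measures_dict.map Prod.fst := by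
  unfold pvDirect at h
  rw [PySem.Set.mem_ofList] at h
  rcases List.mem_map.1 h with ⟨p, hp, rfl⟩
  exact List.mem_map.2 ⟨p, (List.mem_filter.1 hp).1, rfl⟩

theorem pvA_visited_mono (measures_dict : List (String × String)) (fuel : Nat) :
    ∀ (name : String) (V : List String) (inc : Bool) (y : String),
      V.contains y = true → ((pvA measures_dict fuel name V inc).2).contains y = true := by
  induction fuel with
  | zero =>
    intro name V inc y hy
    rw [pvA]
    split
    · exact hy
    · exact hy
  | succ fuel' ih =>
    intro name V inc y hy
    rw [pvA]
    split
    · exact hy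
    · have hadd : List.contains (PySem.Set.add V name) y = true := by
        rw [contains_add, hy]; simp
      cases inc with
      | false => simpa using hadd
      | true =>
        simp only [Bool.not_true]
        rw [if_neg Bool.false_ne_true]
        have aux : ∀ (l : List String) (st : List String × List String),
            st.2.contains y = true →
            ((l.foldl (fun st d =>
              let p := pvA measures_dict fuel' d st.2 true
              (PySem.Set.union st.1 p.1, p.2)) st).2).contains y = true := by
          intro l
          induction l with
          | nil => intro st hst; exact hst
          | cons d l ihl =>
            intro st hst
            rw [List.foldl_cons]
            exact ihl _ (ih d st.2 true y hst)
        exact aux _ _ hadd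

theorem pvA_nodup (measures_dict : List (String × String)) (fuel : Nat) :
    ∀ (name : String) (V : List String) (inc : Bool),
      ((pvA measures_dict fuel name V inc).1).Nodup := by
  induction fuel with
  | zero =>
    intro name V inc
    rw [pvA]
    split
    · exact List.nodup_nil
    · exact List.nodup_nil
  | succ fuel' ih =>
    intro name V inc
    rw [pvA]
    split
    · exact List.nodup_nil
    · have hdeps : (pvDirect measures_dict name).Nodup := PySem.Set.nodup_ofList _
      cases inc with
      | false => simpa using hdeps
      | true =>
        simp only [Bool.not_true]
        rw [if_neg Bool.false_ne_true]
        have aux : ∀ (l : List String) (st : List String × List String),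
            st.1.Nodup →
            ((l.foldl (fun st d =>
              let p := pvA measures_dict fuel' d st.2 true
              (PySem.Set.union st.1 p.1, p.2)) st).1).Nodup := by
          intro l
          induction l with
          | nil => intro st hst; exact hst
          | cons d l ihl =>
            intro st hst
            rw [List.foldl_cons]
            exact ihl _ (PySem.Set.nodup_union _ _ hst)
        exact aux _ _ hdeps

theorem set_add_update (s t : List String) (x : String) :
    PySem.Set.add (PySem.Set.update s t) x = PySem.Set.update s (PySem.Set.add t x) := by
  by_cases hx : x ∈ t
  · rw [PySem.Set.add_of_mem hx,
      PySem.Set.add_of_mem (show x ∈ PySem.Set.update s t from (PySem.Set.mem_update _ _ _).2 (Or.inr hx))]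
  · rw [PySem.Set.add_of_not_mem hx, PySem.Set.update_append, PySem.Set.update_cons,
      PySem.Set.update_nil]

theorem set_update_assoc (u : List String) : ∀ (s t : List String),
    PySem.Set.update (PySem.Set.update s t) u = PySem.Set.update s (PySem.Set.update t u) := by
  induction u with
  | nil => intro s t; rw [PySem.Set.update_nil, PySem.Set.update_nil]
  | cons x u ih =>
    intro s t
    rw [PySem.Set.update_cons, set_add_update, ih, ← PySem.Set.update_cons]

theorem machine_irrel (measures_dict : List (String × String)) (U : List String)
    (hU : ∀ p ∈ measures_dict, p.1 ∈ U) :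
    ∀ (n : Nat) (s : List String), (∀ x ∈ s, x ∈ U) →
      ∀ (V R : List String) (f1 f2 : Nat), pvFresh U V ≤ n → pvFresh U V ≤ f1 → pvFresh U V ≤ f2 →
        pvMachine measures_dict f1 s V R = pvMachine measures_dict f2 s V R := by
  intro n
  induction n using Nat.strong_induction_on with
  | _ n IH =>
  intro s
  induction s with
  | nil => intro _ V R f1 f2 _ _ _; rw [pvMachine.eq_def, pvMachine.eq_def]
  | cons cur rest ihs =>
    intro hs V R f1 f2 hn h1 h2
    rw [pvMachine.eq_def, pvMachine.eq_def]
    cases hc : List.contains V cur with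
    | true =>
      simp only [hc, eq_self_iff_true, if_true]
      exact ihs (fun x hx => hs x (List.mem_cons_of_mem _ hx)) V R f1 f2 hn h1 h2
    | false =>
      have hcur : cur ∈ U := hs cur List.mem_cons_self
      have hlt := pvFresh_lt_of_add U V cur hcur hc
      obtain ⟨f1', rfl⟩ : ∃ k, f1 = k + 1 := ⟨f1 - 1, by omega⟩
      obtain ⟨f2', rfl⟩ : ∃ k, f2 = k + 1 := ⟨f2 - 1, by omega⟩
      simp only [hc, Bool.false_eq_true, if_false]
      have hsub : ∀ x ∈ pvDirect measures_dict cur ++ rest, x ∈ U := by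
        intro x hx
        rcases List.mem_append.1 hx with hx | hx
        · rcases List.mem_map.1 (pvDirect_subset _ _ _ hx) with ⟨p, hp, rfl⟩
          exact hU p hp
        · exact hs x (List.mem_cons_of_mem _ hx)
      exact IH (pvFresh U (PySem.Set.add V cur)) (by omega) _ hsub
        (PySem.Set.add V cur) (PySem.Set.union R (pvDirect measures_dict cur))
        f1' f2' le_rfl (by omega) (by omega)

theorem set_union_nil (s : List String) : PySem.Set.union s [] = s :=
  PySem.Set.update_nil s

theorem set_union_assoc (s t u : List String) :
    PySem.Set.union (PySem.Set.union s t) u = PySem.Set.union s (PySem.Set.union t u) :=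
  set_update_assoc u s t

theorem sim (measures_dict : List (String × String)) (U : List String)
    (hU : ∀ p ∈ measures_dict, p.1 ∈ U) :
    ∀ (n : Nat) (V : List String), pvFresh U V ≤ n →
      ∀ (name : String), name ∈ U → ∀ (rest : List String), (∀ x ∈ rest, x ∈ U) →
        ∀ (R : List String) (fL fA fR : Nat),
          pvFresh U V ≤ fL → pvFresh U V ≤ fA → pvFresh U V ≤ fR →
          pvMachine measures_dict fL (name :: rest) V R
            = pvMachine measures_dict fR rest (pvA measures_dict fA name V true).2
                (PySem.Set.union R (pvA measures_dict fA name V true).1) := by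
  intro n
  induction n using Nat.strong_induction_on with
  | _ n IH =>
  intro V hVn name hname rest hrest R fL fA fR hL hA hR
  cases hc : List.contains V name with
  | true =>
    rw [pvMachine.eq_def, pvA.eq_def]
    simp only [hc, eq_self_iff_true, if_true]
    rw [set_union_nil]
    exact machine_irrel measures_dict U hU (pvFresh U V) rest hrest V R fL fR le_rfl hL hR
  | false =>
    have hlt := pvFresh_lt_of_add U V name hname hc
    obtain ⟨fL', rfl⟩ : ∃ k, fL = k + 1 := ⟨fL - 1, by omega⟩
    obtain ⟨fA', rfl⟩ : ∃ k, fA = k + 1 := ⟨fA - 1, by omega⟩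
    rw [pvMachine.eq_def, pvA]
    simp only [hc, Bool.false_eq_true, if_false, Bool.not_true]
    have hdeps : ∀ x ∈ pvDirect measures_dict name, x ∈ U := by
      intro x hx
      rcases List.mem_map.1 (pvDirect_subset _ _ _ hx) with ⟨p, hp, rfl⟩
      exact hU p hp
    have main : ∀ (ds : List String), (∀ x ∈ ds, x ∈ U) →
        ∀ (W acc : List String),
          (∀ y, List.contains (PySem.Set.add V name) y = true → List.contains W y = true) →
          pvMachine measures_dict fL' (ds ++ rest) W (PySem.Set.union R acc)
            = pvMachine measures_dict fR rest
                ((ds.foldl (fun st d =>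
                  let p := pvA measures_dict fA' d st.2 true
                  (PySem.Set.union st.1 p.1, p.2)) (acc, W)).2)
                (PySem.Set.union R ((ds.foldl (fun st d =>
                  let p := pvA measures_dict fA' d st.2 true
                  (PySem.Set.union st.1 p.1, p.2)) (acc, W)).1)) := by
      intro ds
      induction ds with
      | nil =>
        intro _ W acc hW
        simp only [List.foldl_nil, List.nil_append]
        have hWf : pvFresh U W ≤ pvFresh U (PySem.Set.add V name) :=
          pvFresh_antitone U (PySem.Set.add V name) W hW
        exact machine_irrel measures_dict U hU (pvFresh U W) rest hrest W
          (PySem.Set.union R acc) fL' fR le_rfl (by omega) (by omega)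
      | cons d ds ihd =>
        intro hds W acc hW
        simp only [List.foldl_cons, List.cons_append]
        have hWf : pvFresh U W ≤ pvFresh U (PySem.Set.add V name) :=
          pvFresh_antitone U (PySem.Set.add V name) W hW
        have step := IH (pvFresh U W) (by omega) W le_rfl d (hds d List.mem_cons_self)
          (ds ++ rest) (fun x hx => by
            rcases List.mem_append.1 hx with h | h
            · exact hds x (List.mem_cons_of_mem _ h)
            · exact hrest x h)
          (PySem.Set.union R acc) fL' fA' fL' (by omega) (by omega) (by omega)
        rw [step, set_union_assoc]
        exact ihd (fun x hx => hds x (List.mem_cons_of_mem _ hx))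
          (pvA measures_dict fA' d W true).2
          (PySem.Set.union acc (pvA measures_dict fA' d W true).1)
          (fun y hy => pvA_visited_mono measures_dict fA' d W true y (hW y hy))
    exact main (pvDirect measures_dict name) hdeps (PySem.Set.add V name)
      (pvDirect measures_dict name) (fun y hy => hy)

-- ===== VERDICT (by name: the statement is the Claim_ definition above) =====
theorem get_dependent_measures_py_spec : Claim_equal_get_dependent_measures_py := by
  intro measure_name measures_dict visited include_all_dependents _
  unfold Spec_get_dependent_measures_py
  unfold get_dependent_measures_py get_dependent_measures_py_alt
  cases hc : List.contains (visited.getD []) measure_name with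
  | true =>
    have hm : measure_name ∈ visited.getD [] := by simpa using hc
    rw [pvA.eq_def]
    simp [hc, hm]
  | false =>
    cases include_all_dependents with
    | false =>
      have hm : measure_name ∉ visited.getD [] := by simpa using hc
      rw [pvA.eq_def]
      simp [hc, hm]
    | true =>
      simp only [hc, Bool.false_eq_true, if_false, Bool.not_true]
      have hU : ∀ p ∈ measures_dict, p.1 ∈ measure_name :: measures_dict.map Prod.fst :=
        fun p hp => List.mem_cons_of_mem _ (List.mem_map.2 ⟨p, hp, rfl⟩)
      have hF : pvFresh (measure_name :: measures_dict.map Prod.fst) (visited.getD [])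
          ≤ measures_dict.length + 2 := by
        have h1 := pvFresh_le_length (measure_name :: measures_dict.map Prod.fst) (visited.getD [])
        simp only [List.length_cons, List.length_map] at h1
        omega
      have h := sim measures_dict (measure_name :: measures_dict.map Prod.fst) hU
        (pvFresh (measure_name :: measures_dict.map Prod.fst) (visited.getD []))
        (visited.getD []) le_rfl measure_name List.mem_cons_self [] (by simp) []
        (measures_dict.length + 2) (measures_dict.length + 2) (measures_dict.length + 2)
        hF hF hF
      rw [h, pvMachine.eq_def]
      exact (PySem.Set.ofList_eq_self_of_nodup _
        (pvA_nodup measures_dict (measures_dict.length + 2) measure_name (visited.getD []) true)).symm
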